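-- pv_equiv track=rewrite | github.com/SushilRajeev1997/Python-Infosys | 4. Lists/Assignment 1 - Leap Year/leap_year.py | find_leap_years
-- ===== SOURCE A (Python) =====
-- def find_leap_years(given_year):
--
--     # Write your logic here
--
--     list_of_leap_years = []
--
--     while len(list_of_leap_years) < 15:
--         is_leap = (((given_year % 4 == 0) and (given_year % 100 != 0)) or (given_year % 400 == 0))
--         if is_leap:
--             list_of_leap_years.append(given_year)
--         given_year += 1
--
--     return list_of_leap_years
-- ===== SOURCE B (Python) =====
-- def find_leap_years(given_year):
--     # Jump to the first multiple of 4 at or after given_year; only multiples of 4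
--     # can be leap years.  Among 17 consecutive multiples of 4 (a span of 64 years)
--     # at most one is a century year, and a century divisible by 400 is still leap,
--     # so at least 16 of the 17 candidates are leap years -- more than the 15 needed.
--     first = given_year + (-given_year) % 4
--     return [y for y in range(first, first + 68, 4) if y % 100 != 0 or y % 400 == 0][:15]
-- ===== Notes on version B (the rewrite author's own statement) =====
-- stated objective: alternative
-- what changed: Instead of A's unbounded while-loop that tests every single year with the full three-part leap test, B rounds up to the next multiple of four and takes the first fifteen survivors of a fixed seventeen-candidate stride-four comprehension filtered by the century rule alone.
import Mathlib
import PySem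

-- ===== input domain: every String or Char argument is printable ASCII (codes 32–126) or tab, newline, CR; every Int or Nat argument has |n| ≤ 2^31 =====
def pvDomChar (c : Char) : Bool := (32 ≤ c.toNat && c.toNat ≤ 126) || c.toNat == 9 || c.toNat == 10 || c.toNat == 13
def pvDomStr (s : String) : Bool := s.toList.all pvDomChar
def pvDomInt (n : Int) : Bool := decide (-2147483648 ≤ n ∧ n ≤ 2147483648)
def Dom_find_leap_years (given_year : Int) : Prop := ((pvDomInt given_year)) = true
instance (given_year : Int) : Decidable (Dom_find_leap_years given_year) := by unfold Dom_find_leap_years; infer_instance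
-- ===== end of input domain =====

-- B scans only multiples of 4 (a fixed 17-candidate comprehension) instead of A's
-- year-by-year while-loop; return values are proved identical for every Int.

-- ===== PORT A =====
-- full Python leap test: (y % 4 == 0 and y % 100 != 0) or y % 400 == 0
def pvLeapA (y : Int) : Bool :=
  (decide (PySem.Int.mod y 4 = 0) && decide (PySem.Int.mod y 100 ≠ 0)) || decide (PySem.Int.mod y 400 = 0)

-- A's while-loop; the fuel is only a totality guard: the Python loop always
-- finds its 15 leap years within 127 iterations, far below 1000 (proved below).
def pvLoopA : Nat → Int → List Int → List Int
  | 0, _, acc => acc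
  | f + 1, y, acc =>
      if acc.length < 15 then
        pvLoopA f (y + 1) (if pvLeapA y then acc ++ [y] else acc)
      else acc

def find_leap_years (given_year : Int) : List Int := pvLoopA 1000 given_year []

-- ===== PORT B =====
-- century rule, the only filter B applies to its stride-4 candidates
def pvCentOk (y : Int) : Bool :=
  decide (PySem.Int.mod y 100 ≠ 0) || decide (PySem.Int.mod y 400 = 0)

def find_leap_years_alt (given_year : Int) : List Int :=
  let first := given_year + PySem.Int.mod (-given_year) 4
  (((PySem.List.pyRange first (first + 68) 4).filter pvCentOk).take 15)

-- ===== PRECONDITION & SPEC =====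
def Spec_find_leap_years (given_year : Int) (out : List Int) : Prop := out = find_leap_years_alt given_year
instance (given_year : Int) (out : List Int) : Decidable (Spec_find_leap_years given_year out) := by unfold Spec_find_leap_years; infer_instance

-- ===== CLAIM (what is proved, stated in full; the proofs are below) =====
def Claim_equal_find_leap_years : Prop := ∀ (given_year : Int), Dom_find_leap_years given_year → Spec_find_leap_years given_year (find_leap_years given_year)

-- ===== LEMMAS AND PROOFS =====

-- y, y+4, …, y+4(k-1): the candidate years B ranges over (proof-only helper)
def pvCands (y : Int) : Nat → List Int
  | 0 => []
  | k + 1 => y :: pvCands (y + 4) k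

lemma pvLeapA_iff (y : Int) : pvLeapA y = true ↔ ((y % 4 = 0 ∧ y % 100 ≠ 0) ∨ y % 400 = 0) := by
  simp [pvLeapA, PySem.Int.mod_eq_emod_of_pos]

lemma pvCentOk_iff (y : Int) : pvCentOk y = true ↔ (y % 100 ≠ 0 ∨ y % 400 = 0) := by
  simp [pvCentOk, PySem.Int.mod_eq_emod_of_pos]

lemma pvLeapA_aligned (y : Int) (h : y % 4 = 0) : pvLeapA y = pvCentOk y := by
  by_cases hc : pvCentOk y = true
  · rw [hc, pvLeapA_iff]
    rcases (pvCentOk_iff y).1 hc with h1 | h1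
    · exact Or.inl ⟨h, h1⟩
    · exact Or.inr h1
  · rw [Bool.eq_false_iff.2 hc, Bool.eq_false_iff]
    intro hA
    apply hc
    rw [pvCentOk_iff]
    rcases (pvLeapA_iff y).1 hA with ⟨_, h1⟩ | h1
    · exact Or.inl h1
    · exact Or.inr h1

lemma pvLeapA_of_not_aligned (y : Int) (h : y % 4 ≠ 0) : pvLeapA y = false := by
  rw [Bool.eq_false_iff]
  intro hA
  rcases (pvLeapA_iff y).1 hA with ⟨h1, _⟩ | h1
  · exact h h1
  · exact h (by omega)

-- once the accumulator is full, A's loop returns it unchanged whatever the fuel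
lemma pvLoopA_full (f : Nat) (y : Int) (acc : List Int) (h : 15 ≤ acc.length) :
    pvLoopA f y acc = acc := by
  cases f with
  | zero => rfl
  | succ f => simp [pvLoopA, Nat.not_lt.2 h]

-- one-step unfolding of A's loop
lemma pvLoopA_step (f : Nat) (y : Int) (acc : List Int) :
    pvLoopA (f + 1) y acc =
      if acc.length < 15 then pvLoopA f (y + 1) (if pvLeapA y then acc ++ [y] else acc)
      else acc := rfl

-- skip one step in which nothing is appended
lemma pvLoopA_skip (f : Nat) (y : Int) (acc : List Int) (h : pvLeapA y = false)
    (hl : acc.length < 15) : pvLoopA (f + 1) y acc = pvLoopA f (y + 1) acc := by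
  simp [pvLoopA, h, hl]

-- extra fuel does not change the result once the run reaches 15 elements
lemma pvLoopA_stable (f : Nat) : ∀ (k : Nat) (y : Int) (acc : List Int),
    (pvLoopA f y acc).length = 15 → pvLoopA (f + k) y acc = pvLoopA f y acc := by
  induction f with
  | zero =>
      intro k y acc h
      simp only [pvLoopA] at h
      simp only [Nat.zero_add, pvLoopA]
      exact pvLoopA_full k y acc (by omega)
  | succ f ih =>
      intro k y acc h
      by_cases hl : acc.length < 15
      · have : f + 1 + k = (f + k) + 1 := by omega
        rw [this]
        simp only [pvLoopA, hl, if_true] at h ⊢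
        exact ih k (y + 1) _ h
      · rw [pvLoopA_full _ _ _ (by omega), pvLoopA_full _ _ _ (by omega)]

lemma pvCands_filter_succ (y : Int) (k : Nat) :
    (pvCands y (k + 1)).filter pvCentOk =
      (if pvCentOk y then [y] else []) ++ (pvCands (y + 4) k).filter pvCentOk := by
  by_cases hc : pvCentOk y = true <;> simp [pvCands, hc]

-- three consecutive non-multiples of 4 are skipped without appending
lemma pvLoopA_skip3 (k : Nat) (y : Int) (acc : List Int) (hy : y % 4 = 0)
    (hl : acc.length < 15) :
    pvLoopA (4 * k + 3) (y + 1) acc = pvLoopA (4 * k) (y + 4) acc := by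
  rw [show 4 * k + 3 = (4 * k + 2) + 1 by omega,
    pvLoopA_skip _ _ _ (pvLeapA_of_not_aligned _ (by omega)) hl,
    show y + 1 + 1 = y + 2 by ring, show 4 * k + 2 = (4 * k + 1) + 1 by omega,
    pvLoopA_skip _ _ _ (pvLeapA_of_not_aligned _ (by omega)) hl,
    show y + 2 + 1 = y + 3 by ring,
    pvLoopA_skip _ _ _ (pvLeapA_of_not_aligned _ (by omega)) hl,
    show y + 3 + 1 = y + 4 by ring]

-- main invariant: from a 4-aligned year, A's loop produces exactly the first
-- (15 - |acc|) filtered candidates, provided the candidate list holds enough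
lemma pvLoopA_eq_take : ∀ (k : Nat) (y : Int) (acc : List Int), y % 4 = 0 →
    15 ≤ acc.length + ((pvCands y k).filter pvCentOk).length →
    pvLoopA (4 * k) y acc = acc ++ ((pvCands y k).filter pvCentOk).take (15 - acc.length) := by
  intro k
  induction k with
  | zero =>
      intro y acc _ hcount
      simp only [pvCands, List.filter_nil, List.length_nil] at hcount ⊢
      rw [List.take_nil, List.append_nil, pvLoopA_full _ _ _ (by omega)]
  | succ k ih =>
      intro y acc hy hcount
      rw [pvCands_filter_succ] at hcount ⊢
      by_cases hl : acc.length < 15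
      · -- one real step at y, then three dead steps at y+1, y+2, y+3
        rw [show 4 * (k + 1) = (4 * k + 3) + 1 by omega, pvLoopA_step, if_pos hl,
          pvLeapA_aligned y hy]
        by_cases hc : pvCentOk y = true
        · simp only [if_pos hc, List.singleton_append, List.length_cons] at hcount ⊢
          rw [show 15 - acc.length = (15 - (acc.length + 1)) + 1 by omega,
            List.take_succ_cons,
            show acc ++ (y :: ((pvCands (y + 4) k).filter pvCentOk).take (15 - (acc.length + 1)))
              = (acc ++ [y]) ++ ((pvCands (y + 4) k).filter pvCentOk).take (15 - (acc.length + 1))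
              by simp]
          by_cases h1 : (acc ++ [y]).length < 15
          · rw [pvLoopA_skip3 k y (acc ++ [y]) hy h1,
              ih (y + 4) (acc ++ [y]) (by omega) (by simp; omega)]
            simp
          · rw [pvLoopA_full _ _ _ (by omega),
              show 15 - (acc.length + 1) = 0 by simp at h1; omega,
              List.take_zero, List.append_nil]
        · simp only [if_neg hc, List.nil_append] at hcount ⊢
          rw [pvLoopA_skip3 k y acc hy hl]
          exact ih (y + 4) acc (by omega) hcount
      · -- accumulator already full before this block
        rw [pvLoopA_full _ _ _ (by omega), Nat.sub_eq_zero_of_le (by omega),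
          List.take_zero, List.append_nil]

-- the century test only depends on the year mod 400
lemma pvCentOk_congr (y z : Int) (h : y % 400 = z % 400) : pvCentOk y = pvCentOk z := by
  have h100 : y % 100 = z % 100 := by omega
  by_cases hc : pvCentOk z = true
  · rw [hc, pvCentOk_iff]
    rcases (pvCentOk_iff z).1 hc with h1 | h1
    · exact Or.inl (by omega)
    · exact Or.inr (by omega)
  · rw [Bool.eq_false_iff.2 hc, Bool.eq_false_iff]
    intro hA
    apply hc
    rw [pvCentOk_iff]
    rcases (pvCentOk_iff y).1 hA with h1 | h1
    · exact Or.inl (by omega)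
    · exact Or.inr (by omega)

lemma pvCands_filter_congr : ∀ (k : Nat) (y z : Int), y % 400 = z % 400 →
    ((pvCands y k).filter pvCentOk).length = ((pvCands z k).filter pvCentOk).length := by
  intro k
  induction k with
  | zero => intro y z _; rfl
  | succ k ih =>
      intro y z h
      rw [pvCands_filter_succ, pvCands_filter_succ, pvCentOk_congr y z h,
        List.length_append, List.length_append, ih (y + 4) (z + 4) (by omega)]
      by_cases hc : pvCentOk z = true <;> simp [hc]

-- checked exhaustively over the 100 aligned residues mod 400
lemma pvCount_mod : (List.range 100).all
    (fun s => decide (15 ≤ ((pvCands (4 * (s : Int)) 17).filter pvCentOk).length)) = true := by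
  decide

-- at least 15 of any 17 consecutive multiples of 4 pass the century test
lemma pvCount (y : Int) (hy : y % 4 = 0) :
    15 ≤ ((pvCands y 17).filter pvCentOk).length := by
  have hz : (y % 400) % 400 = y % 400 := Int.emod_emod_of_dvd y dvd_rfl
  have hb : 0 ≤ y % 400 ∧ y % 400 < 400 ∧ (y % 400) % 4 = 0 := by omega
  obtain ⟨s, hs, hsv⟩ : ∃ s : Nat, s < 100 ∧ (4 * (s : Int)) = y % 400 := by
    refine ⟨(y % 400).toNat / 4, by omega, by omega⟩
  rw [pvCands_filter_congr 17 y (4 * (s : Int)) (by omega)]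
  have := List.all_eq_true.1 pvCount_mod s (List.mem_range.2 hs)
  exact of_decide_eq_true this

-- B's pyRange is exactly the 17 candidates
lemma pvCands_eq_map : ∀ (k : Nat) (y : Int),
    pvCands y k = (List.range k).map (fun j : Nat => y + 4 * (j : Int)) := by
  intro k
  induction k with
  | zero => intro y; rfl
  | succ k ih =>
      intro y
      show y :: pvCands (y + 4) k = _
      rw [List.range_succ_eq_map, List.map_cons, List.map_map, ih (y + 4)]
      congr 1
      · norm_num
      · apply List.map_congr_left
        intro j _
        simp only [Function.comp_apply]
        push_cast
        ring

lemma pvRange_eq_cands (a : Int) : PySem.List.pyRange a (a + 68) 4 = pvCands a 17 := by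
  rw [PySem.List.pyRange_of_pos a (a + 68) (by norm_num),
    if_pos (show a < a + 68 by omega),
    show ((a + 68 - a + 4 - 1) / 4).toNat = 17 by omega, pvCands_eq_map]

-- from an aligned year, 68 fuel suffices and yields B's take-15
lemma pvLoopA_aligned_eq (y : Int) (hy : y % 4 = 0) :
    pvLoopA 68 y [] = ((pvCands y 17).filter pvCentOk).take 15 := by
  have h := pvLoopA_eq_take 17 y [] hy (by simpa using pvCount y hy)
  simpa using h

lemma pvLoopA_aligned_len (y : Int) (hy : y % 4 = 0) :
    (pvLoopA 68 y []).length = 15 := by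
  rw [pvLoopA_aligned_eq y hy, List.length_take]
  have := pvCount y hy
  omega

-- any fuel ≥ 68 gives the same answer from an aligned year
lemma pvLoopA_aligned_fuel (k : Nat) (y : Int) (hy : y % 4 = 0) :
    pvLoopA (68 + k) y [] = ((pvCands y 17).filter pvCentOk).take 15 := by
  rw [pvLoopA_stable 68 k y [] (pvLoopA_aligned_len y hy), pvLoopA_aligned_eq y hy]

-- ===== VERDICT (by name: the statement is the Claim_ definition above) =====
theorem find_leap_years_spec : Claim_equal_find_leap_years := by
  intro y _
  unfold Spec_find_leap_years find_leap_years find_leap_years_alt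
  rw [PySem.Int.mod_eq_emod_of_pos (show (0:Int) < 4 by norm_num)]
  set m : Int := (-y) % 4 with hm
  have h0 : 0 ≤ m := by omega
  have h4 : m < 4 := by omega
  have ha : (y + m) % 4 = 0 := by omega
  show pvLoopA 1000 y [] = ((PySem.List.pyRange (y + m) (y + m + 68) 4).filter pvCentOk).take 15
  rw [pvRange_eq_cands]
  interval_cases m
  · simpa using pvLoopA_aligned_fuel 932 y (by omega)
  · rw [show (1000 : Nat) = (68 + 931) + 1 by rfl,
      pvLoopA_skip _ y [] (pvLeapA_of_not_aligned y (by omega)) (by simp)]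
    simpa using pvLoopA_aligned_fuel 931 (y + 1) (by omega)
  · rw [show (1000 : Nat) = ((68 + 930) + 1) + 1 by rfl,
      pvLoopA_skip _ y [] (pvLeapA_of_not_aligned y (by omega)) (by simp),
      pvLoopA_skip _ (y + 1) [] (pvLeapA_of_not_aligned _ (by omega)) (by simp)]
    have : y + 1 + 1 = y + 2 := by ring
    rw [this]
    simpa using pvLoopA_aligned_fuel 930 (y + 2) (by omega)
  · rw [show (1000 : Nat) = (((68 + 929) + 1) + 1) + 1 by rfl,
      pvLoopA_skip _ y [] (pvLeapA_of_not_aligned y (by omega)) (by simp),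
      pvLoopA_skip _ (y + 1) [] (pvLeapA_of_not_aligned _ (by omega)) (by simp)]
    have : y + 1 + 1 = y + 2 := by ring
    rw [this, pvLoopA_skip _ (y + 2) [] (pvLeapA_of_not_aligned _ (by omega)) (by simp)]
    have : y + 2 + 1 = y + 3 := by ring
    rw [this]
    simpa using pvLoopA_aligned_fuel 929 (y + 3) (by omega)
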